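-- pv_equiv track=rewrite | github.com/TadhgCodyre/Python-LFSR-Implementation | Experiments.py | binaryDist
-- ===== SOURCE A (Python) =====
-- def binaryDist(newState):
--       i = 0
--       distDict = {}
--
--       # Go through newState, incrementing the respective map key value
--       # for every 1 and 0
--       for i in range(0, len(newState)):
--         # Add new pair or increment existing pair
--         if newState[i] in distDict:
--           distDict[newState[i]] += 1
--         else:
--           distDict[newState[i]] = 1
--
--         i += 1
--
--       return distDict
-- ===== SOURCE B (Python) =====
-- def binaryDist(newState):
--     # Simpler: distinct symbols in first-occurrence order, then count each by scanning.
--     return {s: newState.count(s) for s in dict.fromkeys(newState)}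
-- ===== Notes on version B (the rewrite author's own statement) =====
-- stated objective: simpler
-- what changed: Replaces A's index loop that accumulates a counter dict with a collect-distinct-keys pass followed by a count() scan per distinct symbol, as a one-line dict comprehension.
import Mathlib
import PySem

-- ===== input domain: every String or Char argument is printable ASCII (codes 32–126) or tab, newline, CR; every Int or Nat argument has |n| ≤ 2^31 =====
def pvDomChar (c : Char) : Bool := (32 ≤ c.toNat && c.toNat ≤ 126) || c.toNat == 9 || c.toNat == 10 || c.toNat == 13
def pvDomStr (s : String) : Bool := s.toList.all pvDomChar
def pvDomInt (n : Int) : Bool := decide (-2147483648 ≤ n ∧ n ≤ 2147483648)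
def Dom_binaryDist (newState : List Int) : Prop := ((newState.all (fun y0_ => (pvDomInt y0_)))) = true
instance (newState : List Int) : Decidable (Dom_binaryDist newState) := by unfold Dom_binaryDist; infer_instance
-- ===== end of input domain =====

-- B replaces A's single counter-accumulating pass with dedup-the-keys-then-count-each-by-scanning (simpler, one line); equal output proved on Dom.


-- ===== PORT A =====
def binaryDist (newState : List Int) : List (Int × Int) :=
  -- i = 0; distDict = {}; for i in range(0, len(newState)): if newState[i] in distDict: +=1 else: =1
  let distDict : PySem.Dict Int Int :=
    (PySem.List.pyRange 0 (PySem.List.len newState) 1).foldl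
      (fun d i =>
        let x := PySem.List.pyGetD newState i 0
        if d.contains x then d.insert x (d.getD x 0 + 1) else d.insert x 1)
      PySem.Dict.empty
  distDict.items

-- ===== PORT B =====
def binaryDist_alt (newState : List Int) : List (Int × Int) :=
  (PySem.List.dedup newState).map (fun s => (s, (newState.count s : Int)))

-- ===== PRECONDITION & SPEC =====
def Spec_binaryDist (newState : List Int) (out : List (Int × Int)) : Prop := out = binaryDist_alt newState
instance (newState : List Int) (out : List (Int × Int)) : Decidable (Spec_binaryDist newState out) := by unfold Spec_binaryDist; infer_instance

-- ===== CLAIM (what is proved, stated in full; the proofs are below) =====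
def Claim_equal_binaryDist : Prop := ∀ (newState : List Int), Dom_binaryDist newState → Spec_binaryDist newState (binaryDist newState)

-- ===== LEMMAS AND PROOFS =====

-- ===== VERDICT (by name: the statement is the Claim_ definition above) =====
theorem binaryDist_spec : Claim_equal_binaryDist := by
  intro newState _
  unfold Spec_binaryDist binaryDist binaryDist_alt
  dsimp only
  rw [PySem.List.foldl_pyRange_zero_pyGetD newState 0 (fun (d : PySem.Dict Int Int) x => if d.contains x then d.insert x (d.getD x 0 + 1) else d.insert x 1) PySem.Dict.empty]
  have hstep : List.foldl (fun (d : PySem.Dict Int Int) x => if d.contains x then d.insert x (d.getD x 0 + 1) else d.insert x 1) PySem.Dict.empty newState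
      = List.foldl (fun (d : PySem.Dict Int Int) x => d.insert x (d.getD x 0 + 1)) PySem.Dict.empty newState := by
    refine PySem.List.foldl_congr_mem _ _ _ _ ?_
    intro d x _
    by_cases h : d.contains x = true
    · simp [h]
    · have hn : d.get? x = none := by
        rw [PySem.Dict.contains_eq_isSome_get?] at h
        cases hx : d.get? x <;> simp [hx] at h ⊢
      simp [PySem.Dict.getD, hn]
  rw [hstep, PySem.Dict.foldl_insert_getD_add_one_eq_counter, PySem.Dict.items_counter]
  simp [PySem.List.dedup_eq_ofList]
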